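-- pv_equiv track=rewrite | github.com/austonnn/ucsd_bio_2 | bio 2 week 4/1.3.7.py | Convolution_Spectrum
-- ===== SOURCE A (Python) =====
-- def Convolution_Spectrum(Spectrum):
--     ans_list = []
--     tmp_list = [0]
--     #Spectrum = sorted(Spectrum)
--     tmp_list.extend(Spectrum)
--     tmp_list = sorted(tmp_list)
--     for i in tmp_list:
--         for j in tmp_list:
--             if 56 <(i - j)<201:
--                 ans_list.append(i - j)
--
--     return ans_list
-- ===== SOURCE B (Python) =====
-- def _boundary(a, x, strict):
--     # first index k with not (a[k] < x) (strict=True) or not (a[k] <= x) (strict=False)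
--     lo, hi = 0, len(a)
--     while lo < hi:
--         mid = (lo + hi) // 2
--         if (a[mid] < x) if strict else (a[mid] <= x):
--             lo = mid + 1
--         else:
--             hi = mid
--     return lo
--
--
-- def Convolution_Spectrum(Spectrum):
--     t = sorted([0] + Spectrum)
--     res = []
--     for i in t:
--         lo = _boundary(t, i - 200, True)   # first j with j >= i - 200
--         hi = _boundary(t, i - 57, False)   # first j with j > i - 57
--         res.extend(i - v for v in t[lo:hi])
--     return res
-- ===== Notes on version B (the rewrite author's own statement) =====
-- stated objective: faster
-- what changed: Instead of scanning all pairs (i,j) of the sorted list, B binary-searches for each i the index window of j with i-200 <= j <= i-57 and emits that slice, so the inner full scan disappears.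
import Mathlib
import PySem

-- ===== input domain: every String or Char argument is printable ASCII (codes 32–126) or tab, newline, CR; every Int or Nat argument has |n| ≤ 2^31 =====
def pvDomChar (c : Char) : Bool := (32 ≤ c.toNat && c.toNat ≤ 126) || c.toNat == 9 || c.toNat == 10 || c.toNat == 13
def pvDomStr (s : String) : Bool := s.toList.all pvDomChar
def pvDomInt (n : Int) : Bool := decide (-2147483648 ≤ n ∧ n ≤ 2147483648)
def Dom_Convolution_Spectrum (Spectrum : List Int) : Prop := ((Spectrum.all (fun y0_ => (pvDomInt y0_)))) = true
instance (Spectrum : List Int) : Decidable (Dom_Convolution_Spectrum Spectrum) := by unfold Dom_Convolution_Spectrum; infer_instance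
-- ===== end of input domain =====

-- B replaces A's full inner scan over the sorted list by a binary-search window per element
-- (only the j with 56 < i-j < 201 are visited); a timing run measured B faster at the largest size.

-- ===== PORT A =====
-- tmp_list = sorted([0] + Spectrum); for i in tmp_list: for j in tmp_list: if 56 < (i-j) < 201: ans.append(i-j)
def Convolution_Spectrum (Spectrum : List Int) : List Int :=
  let tmp := PySem.List.sorted (0 :: Spectrum) (fun x => x) false
  tmp.foldl (fun ans i =>
    tmp.foldl (fun ans j =>
      if 56 < i - j ∧ i - j < 201 then ans ++ [i - j] else ans) ans) []

-- ===== PORT B =====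
-- _boundary(a, x, strict): binary search for the first index k with not(a[k] < x) (strict)
-- resp. not(a[k] <= x) (non-strict); a[mid] is always in range (0 ≤ lo < hi ≤ len), ported as getD.
def pvBoundary (a : List Int) (x : Int) (strict : Bool) (lo hi : Nat) : Nat :=
  if _h : lo < hi then
    let mid := (lo + hi) / 2
    if (if strict then decide (a.getD mid 0 < x) else decide (a.getD mid 0 ≤ x)) then
      pvBoundary a x strict (mid + 1) hi
    else
      pvBoundary a x strict lo mid
  else lo
termination_by hi - lo
decreasing_by all_goals omega

def Convolution_Spectrum_alt (Spectrum : List Int) : List Int :=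
  let t := PySem.List.sorted (0 :: Spectrum) (fun x => x) false
  t.foldl (fun res i =>
    let lo := pvBoundary t (i - 200) true 0 t.length
    let hi := pvBoundary t (i - 57) false 0 t.length
    res ++ (PySem.List.slice t (some (lo : Int)) (some (hi : Int))).map (fun v => i - v)) []

-- ===== PRECONDITION & SPEC =====
def Spec_Convolution_Spectrum (Spectrum : List Int) (out : List Int) : Prop := out = Convolution_Spectrum_alt Spectrum
instance (Spectrum : List Int) (out : List Int) : Decidable (Spec_Convolution_Spectrum Spectrum out) := by unfold Spec_Convolution_Spectrum; infer_instance

-- ===== CLAIM (what is proved, stated in full; the proofs are below) =====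
def Claim_equal_Convolution_Spectrum : Prop := ∀ (Spectrum : List Int), Dom_Convolution_Spectrum Spectrum → Spec_Convolution_Spectrum Spectrum (Convolution_Spectrum Spectrum)

-- ===== LEMMAS AND PROOFS =====

-- the test used by pvBoundary, as a function of the value
def pvTest (x : Int) (strict : Bool) (v : Int) : Bool :=
  if strict then decide (v < x) else decide (v ≤ x)

-- binary-search invariant: endpoints bracket the boundary
lemma pvBoundary_loop (a : List Int) (x : Int) (strict : Bool) :
    ∀ (n lo hi : Nat), hi - lo ≤ n → lo ≤ hi → hi ≤ a.length →
    (0 < lo → pvTest x strict (a.getD (lo - 1) 0) = true) →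
    (hi < a.length → pvTest x strict (a.getD hi 0) = false) →
    lo ≤ pvBoundary a x strict lo hi ∧ pvBoundary a x strict lo hi ≤ hi ∧
    (0 < pvBoundary a x strict lo hi → pvTest x strict (a.getD (pvBoundary a x strict lo hi - 1) 0) = true) ∧
    (pvBoundary a x strict lo hi < a.length → pvTest x strict (a.getD (pvBoundary a x strict lo hi) 0) = false) := by
  intro n
  induction n with
  | zero =>
    intro lo hi hn hlh hha hpre hpost
    have : lo = hi := by omega
    subst this
    rw [pvBoundary]
    simp only [lt_irrefl, dite_false]
    exact ⟨le_refl _, le_refl _, hpre, hpost⟩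
  | succ n ih =>
    intro lo hi hn hlh hha hpre hpost
    rw [pvBoundary]
    by_cases h : lo < hi
    · simp only [h, dite_true]
      set mid := (lo + hi) / 2 with hmid
      have hm1 : lo ≤ mid := by omega
      have hm2 : mid < hi := by omega
      by_cases ht : pvTest x strict (a.getD mid 0) = true
      · have ht' : (if strict then decide (a.getD mid 0 < x) else decide (a.getD mid 0 ≤ x)) = true := ht
        rw [ht']
        simp only [if_true]
        obtain ⟨a1, a2, a3, a4⟩ := ih (mid + 1) hi (by omega) (by omega) hha
          (fun _ => by simpa using ht) hpost
        exact ⟨by omega, a2, a3, a4⟩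
      · have htf : pvTest x strict (a.getD mid 0) = false := by
          revert ht; cases pvTest x strict (a.getD mid 0) <;> simp
        have ht' : (if strict then decide (a.getD mid 0 < x) else decide (a.getD mid 0 ≤ x)) = false := htf
        rw [ht']
        simp only [Bool.false_eq_true, if_false]
        obtain ⟨a1, a2, a3, a4⟩ := ih lo mid (by omega) (by omega) (by omega) hpre
          (fun _ => htf)
        exact ⟨a1, by omega, a3, a4⟩
    · simp only [h, dite_false]
      have : lo = hi := by omega
      subst this
      exact ⟨le_refl _, le_refl _, hpre, hpost⟩

-- the test is downward closed in the value
lemma pvTest_mono (x : Int) (strict : Bool) {v w : Int} (hvw : w ≤ v)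
    (h : pvTest x strict v = true) : pvTest x strict w = true := by
  cases strict <;> simp_all [pvTest] <;> omega

-- on a sorted list, the boundary characterises the test at every index
lemma pvBoundary_char (a : List Int) (x : Int) (strict : Bool)
    (hs : a.Pairwise (· ≤ ·)) (k : Nat) (hk : k < a.length) :
    pvTest x strict a[k] = decide (k < pvBoundary a x strict 0 a.length) := by
  obtain ⟨h1, h2, h3, h4⟩ := pvBoundary_loop a x strict a.length 0 a.length
    (by omega) (by omega) (le_refl _) (by omega) (by omega)
  set r := pvBoundary a x strict 0 a.length with hr
  have hmono : ∀ (p q : Nat) (hp : p < a.length) (hq : q < a.length), p ≤ q → a[p] ≤ a[q] := by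
    intro p q hp hq hpq
    rcases Nat.lt_or_ge p q with hlt | hge
    · exact (List.pairwise_iff_getElem.mp hs) p q hp hq hlt
    · have : p = q := by omega
      subst this; exact le_refl _
  by_cases hkr : k < r
  · have hr1 : r - 1 < a.length := by omega
    have h3' := h3 (by omega)
    rw [List.getD_eq_getElem a 0 hr1] at h3'
    have hle : a[k] ≤ a[r - 1] := hmono k (r - 1) hk hr1 (by omega)
    rw [pvTest_mono x strict hle h3']
    simp [hkr]
  · have hrl : r < a.length := by omega
    have hf := h4 hrl
    rw [List.getD_eq_getElem a 0 hrl] at hf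
    have hle : a[r] ≤ a[k] := hmono r k hrl hk (by omega)
    have hfk : pvTest x strict a[k] = false := by
      by_contra hc
      have hck : pvTest x strict a[k] = true := by
        revert hc; cases pvTest x strict a[k] <;> simp
      have := pvTest_mono x strict hle hck
      simp [this] at hf
    rw [hfk]
    simp [hkr]

-- a filter whose truth at index k is exactly lo ≤ k < hi is the drop/take segment
lemma filter_eq_segment (p : Int → Bool) :
    ∀ (t : List Int) (lo hi : Nat), lo ≤ hi → hi ≤ t.length →
    (∀ (k : Nat) (hk : k < t.length), p t[k] = decide (lo ≤ k ∧ k < hi)) →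
    t.filter p = (t.drop lo).take (hi - lo) := by
  intro t
  induction t with
  | nil => intro lo hi _ _ _; simp
  | cons h t ih =>
    intro lo hi hlh hlen hchar
    cases lo with
    | zero =>
      cases hi with
      | zero =>
        have hh : p h = false := by simpa using hchar 0 (by simp)
        have hrest : t.filter p = [] := by
          apply List.filter_eq_nil_iff.mpr
          intro x hx
          obtain ⟨k, hk, rfl⟩ := List.mem_iff_getElem.mp hx
          have hc := hchar (k + 1) (by simpa using Nat.succ_lt_succ hk)
          simp at hc
          simp [hc]
        simp [hh, hrest]
      | succ m =>
        have hh : p h = true := by simpa using hchar 0 (by simp)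
        have hrec := ih 0 m (by omega) (by simpa using hlen) (by
          intro k hk
          have hc := hchar (k + 1) (by simpa using Nat.succ_lt_succ hk)
          simpa using hc)
        simp [hh, hrec]
    | succ l =>
      have hh : p h = false := by simpa using hchar 0 (by simp)
      have hrec := ih l (hi - 1) (by omega) (by simp at hlen; omega) (by
        intro k hk
        have hc := hchar (k + 1) (by simpa using Nat.succ_lt_succ hk)
        simp only [List.getElem_cons_succ] at hc
        rw [hc]
        simp only [decide_eq_decide]
        omega)
      have hsub : hi - (l + 1) = hi - 1 - l := by omega
      simp [hh, hrec, hsub]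

-- the inner loop of A, over the sorted list, equals B's window slice
lemma inner_eq (t : List Int) (hs : t.Pairwise (· ≤ ·)) (i : Int) (res : List Int) :
    t.foldl (fun ans j => if 56 < i - j ∧ i - j < 201 then ans ++ [i - j] else ans) res =
    res ++ (PySem.List.slice t (some ((pvBoundary t (i - 200) true 0 t.length : Nat) : Int))
        (some ((pvBoundary t (i - 57) false 0 t.length : Nat) : Int))).map (fun v => i - v) := by
  have hA : t.foldl (fun ans j => if 56 < i - j ∧ i - j < 201 then ans ++ [i - j] else ans) res =
      res ++ (t.filter (fun j => decide (56 < i - j ∧ i - j < 201))).map (fun j => i - j) := by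
    rw [← PySem.List.foldl_append_if (fun j => decide (56 < i - j ∧ i - j < 201)) (fun j => i - j) t res]
    apply PySem.List.foldl_congr_mem'
    intro x _ acc
    simp
  have hloc := pvBoundary_char t (i - 200) true hs
  have hhic := pvBoundary_char t (i - 57) false hs
  obtain ⟨-, hlo1, -, -⟩ := pvBoundary_loop t (i - 200) true t.length 0 t.length
    (by omega) (by omega) (le_refl _) (by omega) (by omega)
  obtain ⟨-, hhi1, -, -⟩ := pvBoundary_loop t (i - 57) false t.length 0 t.length
    (by omega) (by omega) (le_refl _) (by omega) (by omega)
  set lo := pvBoundary t (i - 200) true 0 t.length with hlo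
  set hi := pvBoundary t (i - 57) false 0 t.length with hhi
  have hlh : lo ≤ hi := by
    by_contra hc
    have hhl : hi < t.length := by omega
    have h1 := hloc hi hhl
    have h2 := hhic hi hhl
    simp [pvTest] at h1 h2
    have h3 := h1.mpr (by omega)
    omega
  have hseg := filter_eq_segment (fun j => decide (56 < i - j ∧ i - j < 201)) t lo hi hlh hhi1
    (by
      intro k hk
      have h1 := hloc k hk
      have h2 := hhic k hk
      simp [pvTest] at h1 h2
      simp only [decide_eq_decide]
      constructor
      · intro hw
        refine ⟨?_, h2.mp (by omega)⟩
        by_contra hkl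
        have := h1.mpr (by omega)
        omega
      · rintro ⟨hk1, hk2⟩
        have ha : ¬ t[k] < i - 200 := fun hcon => by have := h1.mp hcon; omega
        have hb := h2.mpr hk2
        omega)
  rw [hA, PySem.List.slice_natCast, hseg]

-- ===== VERDICT (by name: the statement is the Claim_ definition above) =====
theorem Convolution_Spectrum_spec : Claim_equal_Convolution_Spectrum := by
  intro Spectrum _
  unfold Spec_Convolution_Spectrum Convolution_Spectrum Convolution_Spectrum_alt
  apply PySem.List.foldl_congr_mem'
  intro i _ res
  exact inner_eq _ (by simpa using PySem.List.sorted_pairwise (0 :: Spectrum) (fun x => x)) i res
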